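-- pv_equiv track=rewrite | github.com/amanjakunnel/MindMap | Server/server.py | _strip_leading_determiners
-- ===== SOURCE A (Python) =====
-- def _strip_leading_determiners(text):
--     """
--     Repeatedly strip leading articles and weak determiners from a phrase.
--     e.g. "the other words" -> "words"  (strips 'the', then 'other')
--     """
--     leading = (
--         'the ', 'a ', 'an ',
--         'those ', 'these ', 'this ', 'that ',
--         'other ', 'each ', 'every ', 'any ',
--         'our ', 'their ', 'its ', 'his ', 'her ',
--         'some ', 'all ', 'both ', 'such ',
--         'certain ', 'various ', 'several ',
--         'many ', 'more ', 'most ',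
--         'also ', 'therefore ', 'thus ',
--     )
--     changed = True
--     while changed:
--         changed = False
--         t = text.lower().strip()
--         for prefix in leading:
--             if t.startswith(prefix):
--                 text = t[len(prefix):].strip()
--                 changed = True
--                 break
--     return text.strip()
-- ===== SOURCE B (Python) =====
-- def _strip_leading_determiners(text):
--     """Strip the whole run of leading articles/weak determiners in one left-to-right
--     pass over space-separated tokens, instead of restarting the prefix scan each round."""
--     dets = frozenset((
--         'the', 'a', 'an', 'those', 'these', 'this', 'that',
--         'other', 'each', 'every', 'any', 'our', 'their', 'its', 'his', 'her',
--         'some', 'all', 'both', 'such', 'certain', 'various', 'several',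
--         'many', 'more', 'most', 'also', 'therefore', 'thus',
--     ))
--     t = text.lower().strip()
--     stripped = False
--     while True:
--         head, sep, tail = t.partition(' ')
--         if sep and head in dets:
--             t = tail.strip()
--             stripped = True
--         else:
--             break
--     return t if stripped else text.strip()
-- ===== Notes on version B (the rewrite author's own statement) =====
-- stated objective: alternative
-- what changed: B lowercases/strips once and makes a single left-to-right pass splitting off one token at a time with str.partition on a space against a set of determiner words (tracking whether anything was removed), instead of A's restart-the-whole-prefix-tuple scan on every removal.
import Mathlib
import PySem

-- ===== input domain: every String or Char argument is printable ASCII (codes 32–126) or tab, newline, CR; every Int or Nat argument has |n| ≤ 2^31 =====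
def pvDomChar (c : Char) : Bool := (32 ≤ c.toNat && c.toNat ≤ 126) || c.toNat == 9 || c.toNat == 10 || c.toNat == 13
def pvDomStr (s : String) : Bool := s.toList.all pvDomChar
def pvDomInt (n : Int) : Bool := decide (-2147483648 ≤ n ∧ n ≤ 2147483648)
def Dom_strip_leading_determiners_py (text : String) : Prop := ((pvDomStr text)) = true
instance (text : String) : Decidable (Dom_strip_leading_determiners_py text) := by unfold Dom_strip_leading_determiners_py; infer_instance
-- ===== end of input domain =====

-- B makes a single left-to-right token pass, partitioning off one space-separated token at a time against a determiner set,
-- instead of A's restart-the-prefix-tuple scan after every removal (objective: alternative).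

-- ===== PORT A =====
-- the 'leading' tuple of A, in A's order
def pvLeading : List (List Char) :=
  ["the ".toList, "a ".toList, "an ".toList,
   "those ".toList, "these ".toList, "this ".toList, "that ".toList,
   "other ".toList, "each ".toList, "every ".toList, "any ".toList,
   "our ".toList, "their ".toList, "its ".toList, "his ".toList, "her ".toList,
   "some ".toList, "all ".toList, "both ".toList, "such ".toList,
   "certain ".toList, "various ".toList, "several ".toList,
   "many ".toList, "more ".toList, "most ".toList,
   "also ".toList, "therefore ".toList, "thus ".toList]

-- A's inner 'for prefix in leading: if t.startswith(prefix): …; break' — first matching prefix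
def pvFindPrefix (t : List Char) : List (List Char) → Option (List Char)
  | [] => none
  | p :: ps => if PySem.Chars.startswith t p then some p else pvFindPrefix t ps

theorem pvFindPrefix_sound {t p : List Char} : ∀ {ps : List (List Char)},
    pvFindPrefix t ps = some p → p ∈ ps ∧ PySem.Chars.startswith t p = true := by
  intro ps
  induction ps with
  | nil => simp [pvFindPrefix]
  | cons q qs ih =>
    simp only [pvFindPrefix]
    split
    · rename_i hq; intro h; cases h; exact ⟨List.mem_cons_self, hq⟩
    · intro h; rcases ih h with ⟨h1, h2⟩; exact ⟨List.mem_cons_of_mem _ h1, h2⟩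

theorem pvStrip_sublist (s : List Char) : (PySem.Chars.strip s).Sublist s := by
  have h1 : (PySem.Chars.lstrip s).Sublist s := List.dropWhile_sublist _
  have h2 : (PySem.Chars.rstrip (PySem.Chars.lstrip s)).Sublist (PySem.Chars.lstrip s) := by
    have := List.dropWhile_sublist (p := PySem.Chars.isspace) (l := (PySem.Chars.lstrip s).reverse)
    simpa [PySem.Chars.rstrip] using this.reverse
  exact h2.trans h1

theorem pvStrip_length_le (s : List Char) : (PySem.Chars.strip s).length ≤ s.length :=
  (pvStrip_sublist s).length_le

theorem pvLeading_two_le : ∀ p ∈ pvLeading, 2 ≤ p.length := by decide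

-- A's while-loop: while changed: t = text.lower().strip(); for prefix in leading: …
def pvALoop (text : List Char) : List Char :=
  match hfp : pvFindPrefix (PySem.Chars.strip (PySem.Chars.lower text)) pvLeading with
  | some p => pvALoop (PySem.Chars.strip ((PySem.Chars.strip (PySem.Chars.lower text)).drop p.length))
  | none => PySem.Chars.strip text
  termination_by text.length
  decreasing_by
    rcases pvFindPrefix_sound hfp with ⟨hmem, hsw⟩
    have hpre : p <+: PySem.Chars.strip (PySem.Chars.lower text) :=
      (PySem.Chars.startswith_iff _ _).mp hsw
    have h2 : 2 ≤ p.length := pvLeading_two_le p hmem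
    have hle : p.length ≤ (PySem.Chars.strip (PySem.Chars.lower text)).length := hpre.length_le
    have ht : (PySem.Chars.strip (PySem.Chars.lower text)).length ≤ text.length := by
      calc (PySem.Chars.strip (PySem.Chars.lower text)).length
          ≤ (PySem.Chars.lower text).length := pvStrip_length_le _
        _ = text.length := by simp [PySem.Chars.lower]
    have := pvStrip_length_le ((PySem.Chars.strip (PySem.Chars.lower text)).drop p.length)
    simp only [List.length_drop] at this
    omega

def strip_leading_determiners_py (text : String) : String :=
  String.mk (pvALoop text.toList)

-- ===== PORT B =====
-- the determiner words, without the trailing space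
def pvDets : List (List Char) :=
  ["the".toList, "a".toList, "an".toList,
   "those".toList, "these".toList, "this".toList, "that".toList,
   "other".toList, "each".toList, "every".toList, "any".toList,
   "our".toList, "their".toList, "its".toList, "his".toList, "her".toList,
   "some".toList, "all".toList, "both".toList, "such".toList,
   "certain".toList, "various".toList, "several".toList,
   "many".toList, "more".toList, "most".toList,
   "also".toList, "therefore".toList, "thus".toList]

-- t.partition on a space: some (head, tail) when a space occurs (head = before the first space), none otherwise
def pvPartitionSpace : List Char → Option (List Char × List Char)
  | [] => none
  | c :: cs =>
    if c = ' ' then some ([], cs)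
    else (pvPartitionSpace cs).map (fun p => (c :: p.1, p.2))

theorem pvPartitionSpace_some {t h tail : List Char} :
    pvPartitionSpace t = some (h, tail) → t = h ++ ' ' :: tail ∧ ' ' ∉ h := by
  induction t generalizing h tail with
  | nil => simp [pvPartitionSpace]
  | cons c cs ih =>
    simp only [pvPartitionSpace]
    split
    · rename_i hc; subst hc; intro he
      cases he; simp
    · rename_i hc
      cases hp : pvPartitionSpace cs with
      | none => simp [hp]
      | some q =>
        simp only [hp, Option.map_some, Option.some_inj]
        intro he
        cases he
        rcases ih (h := q.1) (tail := q.2) (by simp [hp]) with ⟨h1, h2⟩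
        refine ⟨by simp [h1], ?_⟩
        simp only [List.mem_cons, not_or]
        exact ⟨fun he => hc he.symm, h2⟩

-- Source B's while-True loop over head, sep, tail from partitioning t at the first space
def pvBLoop (t : List Char) (stripped : Bool) (orig : List Char) : List Char :=
  match hp : pvPartitionSpace t with
  | some (h, tail) =>
    if h ∈ pvDets then pvBLoop (PySem.Chars.strip tail) true orig
    else if stripped then t else PySem.Chars.strip orig
  | none => if stripped then t else PySem.Chars.strip orig
  termination_by t.length
  decreasing_by
    have := (pvPartitionSpace_some hp).1
    have h2 := pvStrip_length_le tail
    subst this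
    simp only [List.length_append, List.length_cons]
    omega

def strip_leading_determiners_py_alt (text : String) : String :=
  String.mk (pvBLoop (PySem.Chars.strip (PySem.Chars.lower text.toList)) false text.toList)

-- ===== PRECONDITION & SPEC =====
def Spec_strip_leading_determiners_py (text : String) (out : String) : Prop := out = strip_leading_determiners_py_alt text
instance (text : String) (out : String) : Decidable (Spec_strip_leading_determiners_py text out) := by unfold Spec_strip_leading_determiners_py; infer_instance

-- ===== CLAIM (what is proved, stated in full; the proofs are below) =====
def Claim_equal_strip_leading_determiners_py : Prop := ∀ (text : String), Dom_strip_leading_determiners_py text → Spec_strip_leading_determiners_py text (strip_leading_determiners_py text)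

-- ===== LEMMAS AND PROOFS =====

theorem pvCharOfNat_toNat (n : Nat) (h : n < 55296) : (Char.ofNat n).toNat = n := by
  have hv : Nat.isValidChar n := Or.inl h
  rw [Char.ofNat, dif_pos hv]
  show (Char.ofNatAux n hv).val.toNat = n
  rw [Char.ofNatAux]
  simp [UInt32.toNat, BitVec.toNat_ofNatLT]

-- lowerChar is idempotent (a lowered char is no longer in 'A'..'Z')
theorem pvLowerChar_idem (c : Char) :
    PySem.Chars.lowerChar (PySem.Chars.lowerChar c) = PySem.Chars.lowerChar c := by
  simp only [PySem.Chars.lowerChar, PySem.Chars.isupper]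
  split
  · rename_i h
    simp only [Bool.and_eq_true, decide_eq_true_eq] at h
    have hA : ('A').val.toNat = 65 := by decide
    have hZ : ('Z').val.toNat = 90 := by decide
    have h65 : 65 ≤ c.toNat := by
      have := UInt32.le_iff_toNat_le.mp (Char.le_def.mp h.1)
      rw [hA] at this
      exact this
    have h90 : c.toNat ≤ 90 := by
      have := UInt32.le_iff_toNat_le.mp (Char.le_def.mp h.2)
      rw [hZ] at this
      exact this
    have ht : (Char.ofNat (c.toNat + 32)).toNat = c.toNat + 32 :=
      pvCharOfNat_toNat _ (by omega)
    rw [if_neg]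
    simp only [Bool.and_eq_true, decide_eq_true_eq]
    rintro ⟨-, h2⟩
    have := UInt32.le_iff_toNat_le.mp (Char.le_def.mp h2)
    rw [hZ] at this
    have : (Char.ofNat (c.toNat + 32)).toNat ≤ 90 := this
    omega
  · rfl

theorem pvMapFix {l : List Char} {f : Char → Char} (h : ∀ c ∈ l, f c = c) : l.map f = l := by
  induction l with
  | nil => rfl
  | cons a t ih => simp [h a (by simp), ih (fun c hc => h c (List.mem_cons_of_mem _ hc))]

theorem pvSw_iff {w : List Char} (hw : ' ' ∉ w) : ∀ {t : List Char},
    (PySem.Chars.startswith t (w ++ [' ']) = true ↔ ∃ u, pvPartitionSpace t = some (w, u)) := by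
  induction w with
  | nil =>
    intro t
    cases t with
    | nil => simp [PySem.Chars.startswith_iff, pvPartitionSpace]
    | cons c cs =>
      simp only [List.nil_append, PySem.Chars.startswith_iff, pvPartitionSpace,
        List.cons_prefix_cons, List.nil_prefix, and_true]
      constructor
      · intro h
        subst h
        exact ⟨cs, by simp⟩
      · rintro ⟨u, hu⟩
        split at hu
        · rename_i hc; exact hc.symm
        · cases hq : pvPartitionSpace cs with
          | none => rw [hq] at hu; simp at hu
          | some q => rw [hq] at hu; simp at hu
  | cons a w' ih =>
    intro t
    have ha : a ≠ ' ' := fun he => hw (by simp [he])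
    have hw' : ' ' ∉ w' := fun he => hw (List.mem_cons_of_mem _ he)
    cases t with
    | nil => simp [PySem.Chars.startswith_iff, pvPartitionSpace]
    | cons c cs =>
      simp only [List.cons_append, PySem.Chars.startswith_iff, List.cons_prefix_cons,
        pvPartitionSpace]
      constructor
      · rintro ⟨rfl, hpre⟩
        have hsw := (PySem.Chars.startswith_iff cs (w' ++ [' '])).mpr hpre
        rcases (ih (hw := hw')).mp hsw with ⟨u, hu⟩
        refine ⟨u, ?_⟩
        rw [if_neg (fun he => ha he), hu]
        rfl
      · rintro ⟨u, hu⟩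
        split at hu
        · rename_i hc; cases hu
        · rename_i hc
          cases hq : pvPartitionSpace cs with
          | none => rw [hq] at hu; cases hu
          | some q =>
            obtain ⟨q1, q2⟩ := q
            rw [hq] at hu
            simp only [Option.map_some, Option.some_inj, Prod.mk.injEq] at hu
            obtain ⟨h1, h2⟩ := hu
            obtain ⟨rfl, hq1⟩ : c = a ∧ q1 = w' := List.cons_eq_cons.mp h1
            refine ⟨rfl, ?_⟩
            have hex : ∃ u, pvPartitionSpace cs = some (w', u) := ⟨q2, by rw [hq, hq1]⟩
            exact (PySem.Chars.startswith_iff _ _).mp ((ih (hw := hw')).mpr hex)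

theorem pvFp_of_part_some {t h tail : List Char} (hp : pvPartitionSpace t = some (h, tail)) :
    ∀ ds : List (List Char), (∀ w ∈ ds, ' ' ∉ w) →
    pvFindPrefix t (ds.map (· ++ [' '])) = if h ∈ ds then some (h ++ [' ']) else none := by
  intro ds hds
  induction ds with
  | nil => simp [pvFindPrefix]
  | cons w ws ih =>
    have hwfree : ' ' ∉ w := hds w (by simp)
    simp only [List.map_cons, pvFindPrefix]
    by_cases hwh : w = h
    · subst hwh
      have : PySem.Chars.startswith t (w ++ [' ']) = true :=
        (pvSw_iff hwfree).mpr ⟨tail, hp⟩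
      simp [this]
    · have : PySem.Chars.startswith t (w ++ [' ']) ≠ true := by
        intro hsw
        rcases (pvSw_iff hwfree).mp hsw with ⟨u, hu⟩
        rw [hp] at hu
        cases hu
        exact hwh rfl
      simp only [Bool.not_eq_true] at this
      rw [this]
      simp only [Bool.false_eq_true, if_false]
      rw [ih (fun x hx => hds x (List.mem_cons_of_mem _ hx))]
      simp [List.mem_cons, hwh, Ne.symm, fun he : h = w => hwh he.symm]

theorem pvFp_of_part_none {t : List Char} (hp : pvPartitionSpace t = none) :
    ∀ ds : List (List Char), (∀ w ∈ ds, ' ' ∉ w) →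
    pvFindPrefix t (ds.map (· ++ [' '])) = none := by
  intro ds hds
  induction ds with
  | nil => simp [pvFindPrefix]
  | cons w ws ih =>
    have hwfree : ' ' ∉ w := hds w (by simp)
    have : PySem.Chars.startswith t (w ++ [' ']) ≠ true := by
      intro hsw
      rcases (pvSw_iff hwfree).mp hsw with ⟨u, hu⟩
      rw [hp] at hu
      cases hu
    simp only [Bool.not_eq_true] at this
    simp only [List.map_cons, pvFindPrefix, this]
    simp only [Bool.false_eq_true, if_false]
    exact ih (fun x hx => hds x (List.mem_cons_of_mem _ hx))

theorem pvLeading_eq : pvLeading = pvDets.map (· ++ [' ']) := by decide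

theorem pvDets_nospace : ∀ w ∈ pvDets, ' ' ∉ w := by decide

-- strip is idempotent
theorem pvLstrip_idem (s : List Char) :
    PySem.Chars.lstrip (PySem.Chars.lstrip s) = PySem.Chars.lstrip s := by
  simp [PySem.Chars.lstrip, List.dropWhile_idempotent]

theorem pvRstrip_idem (s : List Char) :
    PySem.Chars.rstrip (PySem.Chars.rstrip s) = PySem.Chars.rstrip s := by
  simp [PySem.Chars.rstrip, List.dropWhile_idempotent]

theorem pvRstrip_prefix (s : List Char) : PySem.Chars.rstrip s <+: s := by
  have h : (s.reverse.dropWhile PySem.Chars.isspace) <:+ s.reverse := List.dropWhile_suffix _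
  have := (List.reverse_prefix (l₁ := s.reverse.dropWhile PySem.Chars.isspace) (l₂ := s.reverse)).mpr h
  simpa [PySem.Chars.rstrip] using this

theorem pvLstrip_of_head {u : List Char} (hu : PySem.Chars.lstrip u = u) {v : List Char}
    (hv : v <+: u) : PySem.Chars.lstrip v = v := by
  cases v with
  | nil => rfl
  | cons a t =>
    obtain ⟨w, hw⟩ := hv
    have hna : PySem.Chars.isspace a = false := by
      by_contra hcon
      simp only [Bool.not_eq_false] at hcon
      rw [← hw] at hu
      simp only [PySem.Chars.lstrip, List.cons_append, List.dropWhile_cons, hcon,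
        if_pos] at hu
      have hlen := (List.dropWhile_sublist (p := PySem.Chars.isspace) (l := t ++ w)).length_le
      rw [hu] at hlen
      simp at hlen
    simp [PySem.Chars.lstrip, List.dropWhile_cons, hna]

theorem pvStrip_idem (s : List Char) :
    PySem.Chars.strip (PySem.Chars.strip s) = PySem.Chars.strip s := by
  show PySem.Chars.rstrip (PySem.Chars.lstrip (PySem.Chars.rstrip (PySem.Chars.lstrip s)))
      = PySem.Chars.rstrip (PySem.Chars.lstrip s)
  have hw : PySem.Chars.lstrip (PySem.Chars.lstrip s) = PySem.Chars.lstrip s := pvLstrip_idem s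
  have hv : PySem.Chars.lstrip (PySem.Chars.rstrip (PySem.Chars.lstrip s))
      = PySem.Chars.rstrip (PySem.Chars.lstrip s) :=
    pvLstrip_of_head hw (pvRstrip_prefix _)
  rw [hv, pvRstrip_idem]

-- conditional unfolding lemmas for the two loops
theorem pvALoop_of_none {text : List Char}
    (h : pvFindPrefix (PySem.Chars.strip (PySem.Chars.lower text)) pvLeading = none) :
    pvALoop text = PySem.Chars.strip text := by
  rw [pvALoop.eq_def]
  split
  · rename_i p heq; rw [h] at heq; cases heq
  · rfl

theorem pvALoop_of_some {text p : List Char}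
    (h : pvFindPrefix (PySem.Chars.strip (PySem.Chars.lower text)) pvLeading = some p) :
    pvALoop text
      = pvALoop (PySem.Chars.strip
          ((PySem.Chars.strip (PySem.Chars.lower text)).drop p.length)) := by
  rw [pvALoop.eq_def]
  split
  · rename_i q heq; rw [h] at heq; cases heq; rfl
  · rename_i heq; rw [h] at heq; cases heq

theorem pvBLoop_of_none {t orig : List Char} {b : Bool}
    (h : pvPartitionSpace t = none) :
    pvBLoop t b orig = if b then t else PySem.Chars.strip orig := by
  rw [pvBLoop.eq_def]
  split
  · rename_i p heq; rw [h] at heq; cases heq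
  · rfl

theorem pvBLoop_of_some {t h tail orig : List Char} {b : Bool}
    (hp : pvPartitionSpace t = some (h, tail)) :
    pvBLoop t b orig
      = if h ∈ pvDets then pvBLoop (PySem.Chars.strip tail) true orig
        else if b then t else PySem.Chars.strip orig := by
  rw [pvBLoop.eq_def]
  split
  · rename_i h' tail' heq; rw [hp] at heq; cases heq; rfl
  · rename_i heq; rw [hp] at heq; cases heq

-- members of a strip/drop of a lowered list are fixed by lowerChar
theorem pvFixed_strip {u : List Char} (h : ∀ c ∈ u, PySem.Chars.lowerChar c = c) :
    ∀ c ∈ PySem.Chars.strip u, PySem.Chars.lowerChar c = c :=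
  fun c hc => h c ((pvStrip_sublist u).mem hc)

-- the core equivalence once the text is already lowercase and stripped
theorem pv_canon : ∀ (n : Nat) (u orig : List Char), u.length ≤ n →
    (∀ c ∈ u, PySem.Chars.lowerChar c = c) → PySem.Chars.strip u = u →
    pvALoop u = pvBLoop u true orig := by
  intro n
  induction n with
  | zero =>
    intro u orig hlen hfix hstrip
    have : u = [] := List.length_eq_zero_iff.mp (Nat.le_zero.mp hlen)
    subst this
    rw [pvALoop_of_none (by simp [PySem.Chars.lower, PySem.Chars.strip,
        PySem.Chars.lstrip, PySem.Chars.rstrip, pvLeading_eq, pvFindPrefix,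
        pvFp_of_part_none (t := ([] : List Char)) rfl pvDets pvDets_nospace]),
      pvBLoop_of_none (by rfl)]
    simp [PySem.Chars.strip, PySem.Chars.lstrip, PySem.Chars.rstrip]
  | succ n ih =>
    intro u orig hlen hfix hstrip
    have hlow : PySem.Chars.lower u = u := pvMapFix hfix
    have hkey : PySem.Chars.strip (PySem.Chars.lower u) = u := by rw [hlow, hstrip]
    cases hp : pvPartitionSpace u with
    | none =>
      rw [pvALoop_of_none (by rw [hkey, pvLeading_eq]; exact pvFp_of_part_none hp _ pvDets_nospace),
        pvBLoop_of_none hp, if_pos rfl, hstrip]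
    | some pr =>
      obtain ⟨h, tail⟩ := pr
      have hfp := pvFp_of_part_some hp pvDets pvDets_nospace
      rcases pvPartitionSpace_some hp with ⟨hu, hnos⟩
      by_cases hmem : h ∈ pvDets
      · rw [if_pos hmem] at hfp
        rw [pvALoop_of_some (by rw [hkey, pvLeading_eq]; exact hfp), hkey,
          pvBLoop_of_some hp, if_pos hmem]
        have hdrop : u.drop (h ++ [' ']).length = tail := by
          rw [hu]
          have : h ++ ' ' :: tail = (h ++ [' ']) ++ tail := by simp
          rw [this, List.drop_left]
        rw [hdrop]
        have htl : tail.length + h.length + 1 = u.length := by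
          rw [hu]; simp; omega
        apply ih
        · have := pvStrip_length_le tail; omega
        · apply pvFixed_strip
          intro c hc
          exact hfix c (by rw [hu]; simp [hc])
        · exact pvStrip_idem tail
      · rw [if_neg hmem] at hfp
        rw [pvALoop_of_none (by rw [hkey, pvLeading_eq]; exact hfp),
          pvBLoop_of_some hp, if_neg hmem, if_pos rfl, hstrip]


-- ===== VERDICT (by name: the statement is the Claim_ definition above) =====
theorem strip_leading_determiners_py_spec : Claim_equal_strip_leading_determiners_py := by
  intro text _
  unfold Spec_strip_leading_determiners_py strip_leading_determiners_py strip_leading_determiners_py_alt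
  congr 1
  set tl := text.toList with htl
  cases hp : pvPartitionSpace (PySem.Chars.strip (PySem.Chars.lower tl)) with
  | none =>
    rw [pvALoop_of_none (by rw [pvLeading_eq]; exact pvFp_of_part_none hp _ pvDets_nospace),
      pvBLoop_of_none hp]
    simp
  | some pr =>
    obtain ⟨h, tail⟩ := pr
    have hfp := pvFp_of_part_some hp pvDets pvDets_nospace
    rcases pvPartitionSpace_some hp with ⟨hu, hnos⟩
    by_cases hmem : h ∈ pvDets
    · rw [if_pos hmem] at hfp
      rw [pvALoop_of_some (by rw [pvLeading_eq]; exact hfp),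
        pvBLoop_of_some hp, if_pos hmem]
      have hdrop : (PySem.Chars.strip (PySem.Chars.lower tl)).drop (h ++ [' ']).length = tail := by
        rw [hu]
        have : h ++ ' ' :: tail = (h ++ [' ']) ++ tail := by simp
        rw [this, List.drop_left]
      rw [hdrop]
      apply pv_canon (PySem.Chars.strip tail).length _ _ le_rfl
      · apply pvFixed_strip
        intro c hc
        have hc2 : c ∈ PySem.Chars.strip (PySem.Chars.lower tl) := by
          rw [hu]; simp [hc]
        have hc3 : c ∈ PySem.Chars.lower tl := (pvStrip_sublist _).mem hc2
        simp only [PySem.Chars.lower, List.mem_map] at hc3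
        rcases hc3 with ⟨c', _, rfl⟩
        exact pvLowerChar_idem c'
      · exact pvStrip_idem tail
    · rw [if_neg hmem] at hfp
      rw [pvALoop_of_none (by rw [pvLeading_eq]; exact hfp),
        pvBLoop_of_some hp, if_neg hmem]
      simp
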